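-- pv_equiv track=rewrite | github.com/shafe123/AoC23 | day10.py | count_offset
-- ===== SOURCE A (Python) =====
-- def count_offset(grid: list[list[str]], row_offset: int, col_offset: int, main_loop: list[tuple[int, int]]) -> int:
--     count = 0
--     for row_index in range(0, len(grid), row_offset):
--         for col_index in range(0, len(grid[0]), col_offset):
--             val = grid[row_index][col_index]
--             if val != '*' and (row_index, col_index) not in main_loop:
--                 count += 1
--     return count
-- ===== SOURCE B (Python) =====
-- def count_offset(grid: list[list[str]], row_offset: int, col_offset: int, main_loop: list[tuple[int, int]]) -> int:
--     rows = range(0, len(grid), row_offset)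
--     cols = range(0, len(grid[0]) if grid else 0, col_offset)
--     total = len(rows) * len(cols)
--     stars = sum(1 for r in rows for c in cols if grid[r][c] == '*')
--     loop_hits = 0
--     for r, c in dict.fromkeys(main_loop):
--         if r in rows and c in cols and grid[r][c] != '*':
--             loop_hits += 1
--     return total - stars - loop_hits
-- ===== Notes on version B (the rewrite author's own statement) =====
-- stated objective: alternative
-- what changed: Instead of membership-testing every strided cell against main_loop (O(cells * len(main_loop))), B computes the strided-cell total arithmetically, counts '*' cells in one strided pass, and walks the deduplicated main_loop once subtracting loop coordinates that hit the stride grid and are not '*'.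
-- outside the precondition, e.g. on count_offset([['a']], -1, 0, []): A returns 0, B raises ValueError
import Mathlib
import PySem

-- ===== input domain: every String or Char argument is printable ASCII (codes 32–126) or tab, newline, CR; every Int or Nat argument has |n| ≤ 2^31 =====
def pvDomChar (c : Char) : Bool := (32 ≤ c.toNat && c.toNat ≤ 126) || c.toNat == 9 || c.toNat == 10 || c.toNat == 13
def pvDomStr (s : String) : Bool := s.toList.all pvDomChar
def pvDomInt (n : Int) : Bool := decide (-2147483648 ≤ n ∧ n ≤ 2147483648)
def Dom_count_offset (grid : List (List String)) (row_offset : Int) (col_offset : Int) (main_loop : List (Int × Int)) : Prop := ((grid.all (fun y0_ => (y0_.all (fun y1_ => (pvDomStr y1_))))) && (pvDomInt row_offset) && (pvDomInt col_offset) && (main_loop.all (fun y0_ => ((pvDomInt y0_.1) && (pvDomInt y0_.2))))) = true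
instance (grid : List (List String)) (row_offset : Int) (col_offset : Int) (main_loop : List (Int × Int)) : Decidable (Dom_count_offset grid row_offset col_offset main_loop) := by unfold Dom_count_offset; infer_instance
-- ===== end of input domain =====

-- B restates the strided count as: total strided cells − strided '*' cells − deduplicated main_loop
-- coordinates that hit the stride grid and are not '*'; return values proved equal on Pre_.
-- ===== PORT A =====
def count_offset (grid : List (List String)) (row_offset : Int) (col_offset : Int) (main_loop : List (Int × Int)) : Int :=
  (PySem.List.pyRange 0 (grid.length : Int) row_offset).foldl (fun count row_index =>
    (PySem.List.pyRange 0 ((PySem.List.pyGetD grid 0 []).length : Int) col_offset).foldl (fun count col_index =>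
      if PySem.List.pyGetD (PySem.List.pyGetD grid row_index []) col_index "" ≠ "*" ∧ (row_index, col_index) ∉ main_loop
      then count + 1 else count) count) 0

-- ===== PORT B =====
def count_offset_alt (grid : List (List String)) (row_offset : Int) (col_offset : Int) (main_loop : List (Int × Int)) : Int :=
  let rows := PySem.List.pyRange 0 (grid.length : Int) row_offset
  let cols := PySem.List.pyRange 0 (if grid.isEmpty then 0 else ((PySem.List.pyGetD grid 0 []).length : Int)) col_offset
  let total : Int := (rows.length : Int) * (cols.length : Int)
  let stars : Int :=
    ((rows.flatMap (fun r => cols.map (fun c => (r, c)))).countP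
      (fun p => PySem.List.pyGetD (PySem.List.pyGetD grid p.1 []) p.2 "" == "*") : Nat)
  let loop_hits : Int := (PySem.List.dedup main_loop).foldl (fun acc p =>
      if p.1 ∈ rows ∧ p.2 ∈ cols ∧ PySem.List.pyGetD (PySem.List.pyGetD grid p.1 []) p.2 "" ≠ "*"
      then acc + 1 else acc) 0
  total - stars - loop_hits

-- ===== PRECONDITION & SPEC =====
-- Pre_ excludes the inputs where range() gets a zero step in either program (row_offset = 0, where A
-- itself raises ValueError; col_offset = 0, where A raises unless its outer loop is empty but B's own
-- range(...) construction raises ValueError anyway) and ragged grids whose visited strided rows are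
-- shorter than a visited strided column index, where A raises IndexError.
def Pre_count_offset (grid : List (List String)) (row_offset : Int) (col_offset : Int) (main_loop : List (Int × Int)) : Prop :=
  row_offset ≠ 0 ∧ col_offset ≠ 0 ∧
  (0 < row_offset → 0 < col_offset →
    ∀ i : Nat, i < grid.length → row_offset ∣ (i : Int) →
      ∀ j : Nat, j < (grid.headD []).length → col_offset ∣ (j : Int) → j < (grid.getD i []).length)
instance (grid : List (List String)) (row_offset : Int) (col_offset : Int) (main_loop : List (Int × Int)) : Decidable (Pre_count_offset grid row_offset col_offset main_loop) := by unfold Pre_count_offset; infer_instance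
def pvWitness_count_offset : List (List String) × Int × Int × (List (Int × Int)) :=
  ([["*", "a", "b"], ["c", "d", "e"], ["f", "g", "h"]], 2, 2, [(0, 2), (2, 0), (0, 2)])
def Spec_count_offset (grid : List (List String)) (row_offset : Int) (col_offset : Int) (main_loop : List (Int × Int)) (out : Int) : Prop := out = count_offset_alt grid row_offset col_offset main_loop
instance (grid : List (List String)) (row_offset : Int) (col_offset : Int) (main_loop : List (Int × Int)) (out : Int) : Decidable (Spec_count_offset grid row_offset col_offset main_loop out) := by unfold Spec_count_offset; infer_instance

-- ===== CLAIM (what is proved, stated in full; the proofs are below) =====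
def Claim_equal_count_offset : Prop := ∀ (grid : List (List String)) (row_offset : Int) (col_offset : Int) (main_loop : List (Int × Int)), Dom_count_offset grid row_offset col_offset main_loop → Pre_count_offset grid row_offset col_offset main_loop → Spec_count_offset grid row_offset col_offset main_loop (count_offset grid row_offset col_offset main_loop)

-- ===== LEMMAS AND PROOFS =====

-- any python range with a nonzero step has no duplicate elements
lemma pv_nodup_pyRange (a b s : Int) (hs : s ≠ 0) : (PySem.List.pyRange a b s).Nodup := by
  have hinj : Function.Injective (fun k : Nat => a + s * (k : Int)) := by
    intro k1 k2 h
    simp only at h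
    have h2 : s * (k1 : Int) = s * (k2 : Int) := by omega
    have h3 := mul_left_cancel₀ hs h2
    exact_mod_cast h3
  rcases lt_or_gt_of_ne hs with h | h
  · rw [PySem.List.pyRange_of_neg a b h]
    exact (List.nodup_range).map hinj
  · rw [PySem.List.pyRange_of_pos a b h]
    exact (List.nodup_range).map hinj

-- three mutually exclusive, exhaustive predicates partition a list's length
lemma pv_countP_three {α : Type} (p q w : α → Bool) (l : List α)
    (h : ∀ x, (p x).toNat + (q x).toNat + (w x).toNat = 1) :
    l.countP p + l.countP q + l.countP w = l.length := by
  induction l with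
  | nil => simp
  | cons x xs ih =>
    have hx := h x
    simp only [List.countP_cons, List.length_cons]
    cases hp : p x <;> cases hq : q x <;> cases hw : w x <;>
      simp [hp, hq, hw] at hx ⊢ <;> omega

-- per-row partition summed over the rows
lemma pv_rowsum (R : List Int) (f g h : Int → Nat) (m : Nat)
    (hpt : ∀ r, f r + g r + h r = m) :
    (R.map (fun r => (f r : Int))).sum
      = (R.length : Int) * (m : Int)
        - (R.map (fun r => (g r : Int))).sum - (R.map (fun r => (h r : Int))).sum := by
  induction R with
  | nil => simp
  | cons r t ih =>
    simp only [List.map_cons, List.sum_cons, List.length_cons]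
    rw [ih]
    have hc : (f r : Int) + (g r : Int) + (h r : Int) = (m : Int) := by exact_mod_cast hpt r
    push_cast
    ring_nf
    ring_nf at *
    linarith [hc]

-- ===== VERDICT (by name: the statement is the Claim_ definition above) =====
theorem count_offset_spec : Claim_equal_count_offset := by
  intro grid ro co ml _ hpre
  obtain ⟨hro, hco, -⟩ := hpre
  unfold Spec_count_offset
  simp only [count_offset, count_offset_alt]
  have hm : (if grid.isEmpty then 0 else ((PySem.List.pyGetD grid 0 []).length : Int))
      = ((PySem.List.pyGetD grid 0 []).length : Int) := by
    cases grid with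
    | nil => simp [PySem.List.pyGetD]
    | cons g t => simp
  rw [hm]
  set R := PySem.List.pyRange 0 (grid.length : Int) ro
  set C := PySem.List.pyRange 0 ((PySem.List.pyGetD grid 0 []).length : Int) co
  -- inner loop of A is a count over C
  have hinner : ∀ (ri acc : Int),
      C.foldl (fun count ci =>
        if PySem.List.pyGetD (PySem.List.pyGetD grid ri []) ci "" ≠ "*" ∧ (ri, ci) ∉ ml
        then count + 1 else count) acc
      = acc + ((C.countP (fun ci =>
          decide (PySem.List.pyGetD (PySem.List.pyGetD grid ri []) ci "" ≠ "*" ∧ (ri, ci) ∉ ml)) : Nat) : Int) :=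
    fun ri acc => PySem.List.foldl_ite_add_one _ C acc
  simp only [hinner]
  simp only [PySem.List.foldl_ite_add_one, PySem.List.foldl_add, zero_add]
  rw [PySem.List.dedup_eq_ofList]
  -- per-row three-way partition
  have hpart : ∀ r : Int,
      C.countP (fun ci => decide (PySem.List.pyGetD (PySem.List.pyGetD grid r []) ci "" ≠ "*" ∧ (r, ci) ∉ ml))
      + C.countP (fun ci => PySem.List.pyGetD (PySem.List.pyGetD grid r []) ci "" == "*")
      + C.countP (fun ci => decide (PySem.List.pyGetD (PySem.List.pyGetD grid r []) ci "" ≠ "*" ∧ (r, ci) ∈ ml))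
      = C.length := by
    intro r
    apply pv_countP_three
    intro c
    by_cases h1 : PySem.List.pyGetD (PySem.List.pyGetD grid r []) c "" = "*" <;>
      by_cases h2 : (r, c) ∈ ml <;> simp [h1, h2]
  rw [pv_rowsum R
    (fun r => C.countP (fun ci => decide (PySem.List.pyGetD (PySem.List.pyGetD grid r []) ci "" ≠ "*" ∧ (r, ci) ∉ ml)))
    (fun r => C.countP (fun ci => PySem.List.pyGetD (PySem.List.pyGetD grid r []) ci "" == "*"))
    (fun r => C.countP (fun ci => decide (PySem.List.pyGetD (PySem.List.pyGetD grid r []) ci "" ≠ "*" ∧ (r, ci) ∈ ml)))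
    C.length hpart]
  -- stars: the flatMap count is the row-by-row sum
  have hstars : (((R.flatMap (fun r => C.map (fun c => (r, c)))).countP
        (fun p => PySem.List.pyGetD (PySem.List.pyGetD grid p.1 []) p.2 "" == "*") : Nat) : Int)
      = (R.map (fun r => ((C.countP (fun ci => PySem.List.pyGetD (PySem.List.pyGetD grid r []) ci "" == "*") : Nat) : Int))).sum := by
    rw [List.countP_flatMap, Nat.cast_list_sum, List.map_map]
    congr 1
    apply List.map_congr_left
    intro r _
    simp only [Function.comp_apply]
    rw [List.countP_map]
    rfl
  -- loop coordinates: dedup count equals the in-loop strided count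
  have hndV : (R.flatMap (fun r => C.map (fun c => (r, c)))).Nodup :=
    List.Nodup.product (pv_nodup_pyRange _ _ _ hro) (pv_nodup_pyRange _ _ _ hco)
  have hloop :
      ((R.flatMap (fun r => C.map (fun c => (r, c)))).countP
        (fun p => decide (PySem.List.pyGetD (PySem.List.pyGetD grid p.1 []) p.2 "" ≠ "*" ∧ p ∈ ml)) : Nat)
      = ((PySem.Set.ofList ml).countP
        (fun p => decide (p.1 ∈ R ∧ p.2 ∈ C ∧ PySem.List.pyGetD (PySem.List.pyGetD grid p.1 []) p.2 "" ≠ "*")) : Nat) := by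
    rw [List.countP_eq_length_filter, List.countP_eq_length_filter]
    apply List.Perm.length_eq
    rw [List.perm_ext_iff_of_nodup (hndV.filter _) ((PySem.Set.nodup_ofList ml).filter _)]
    rintro ⟨r, c⟩
    have hmemV : (r, c) ∈ R.flatMap (fun r => C.map (fun c => (r, c))) ↔ r ∈ R ∧ c ∈ C :=
      List.pair_mem_product
    simp only [List.mem_filter, decide_eq_true_eq, PySem.Set.mem_ofList, hmemV]
    tauto
  -- same row-wise decomposition for the in-loop count
  have hloop2 :
      ((R.flatMap (fun r => C.map (fun c => (r, c)))).countP
        (fun p => decide (PySem.List.pyGetD (PySem.List.pyGetD grid p.1 []) p.2 "" ≠ "*" ∧ p ∈ ml)) : Nat)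
      = (R.map (fun r => C.countP (fun ci => decide (PySem.List.pyGetD (PySem.List.pyGetD grid r []) ci "" ≠ "*" ∧ (r, ci) ∈ ml)))).sum := by
    rw [List.countP_flatMap]
    congr 1
    apply List.map_congr_left
    intro r _
    simp only [Function.comp_apply]
    rw [List.countP_map]
    rfl
  rw [← hstars]
  rw [← hloop, hloop2, Nat.cast_list_sum, List.map_map]
  simp only [Function.comp_def]
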